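-- pv_equiv track=rewrite | github.com/macCesar/aiskills | skills/stitch-showcase/scripts/build_showcase.py | _extract_design_system_screen
-- ===== SOURCE A (Python) =====
-- DS_SLUG_PATTERNS = ("design_system", "muestrario", "style_guide", "ui_kit", "design_tokens")
--
-- def _extract_design_system_screen(screens: list) -> tuple[dict | None, list]:
--     """
--     Find and remove the design system screen from the screens list.
--
--     Returns (ds_screen_or_None, remaining_screens).
--     """
--     ds_screen = None
--     remaining = []
--     for s in screens:
--         slug = s["slug"]
--         if not ds_screen and any(pat in slug for pat in DS_SLUG_PATTERNS):
--             ds_screen = s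
--         else:
--             remaining.append(s)
--     return ds_screen, remaining
-- ===== SOURCE B (Python) =====
-- DS_SLUG_PATTERNS = ("design_system", "muestrario", "style_guide", "ui_kit", "design_tokens")
--
-- def _extract_design_system_screen(screens: list) -> tuple[dict | None, list]:
--     """Find and remove the design system screen (index-then-slice version)."""
--     slugs = [s["slug"] for s in screens]
--     i = next((j for j, sl in enumerate(slugs)
--               if any(pat in sl for pat in DS_SLUG_PATTERNS)), None)
--     if i is None:
--         return None, list(screens)
--     return screens[i], screens[:i] + screens[i + 1:]
-- ===== Notes on version B (the rewrite author's own statement) =====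
-- stated objective: alternative
-- what changed: B computes all slugs eagerly, locates the first matching index with next/enumerate, and reconstructs the remainder by slicing screens[:i]+screens[i+1:], instead of A's single accumulator loop that appends element by element while tracking a found flag.
import Mathlib
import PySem

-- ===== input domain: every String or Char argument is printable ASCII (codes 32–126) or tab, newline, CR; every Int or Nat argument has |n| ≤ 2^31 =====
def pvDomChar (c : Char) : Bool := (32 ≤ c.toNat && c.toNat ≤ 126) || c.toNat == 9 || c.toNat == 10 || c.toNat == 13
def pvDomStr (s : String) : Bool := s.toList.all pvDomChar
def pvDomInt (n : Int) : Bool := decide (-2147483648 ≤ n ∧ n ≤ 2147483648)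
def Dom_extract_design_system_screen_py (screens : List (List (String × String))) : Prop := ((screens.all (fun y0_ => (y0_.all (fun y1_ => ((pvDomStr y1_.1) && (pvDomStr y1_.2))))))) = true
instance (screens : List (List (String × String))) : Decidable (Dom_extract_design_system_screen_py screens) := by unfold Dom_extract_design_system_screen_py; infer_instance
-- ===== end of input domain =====

-- B locates the first matching index over an eager slug list and reconstructs the
-- remainder by slicing, instead of A's accumulator loop with a found flag (same cost).

-- DS_SLUG_PATTERNS
def pvPatterns : List String := ["design_system", "muestrario", "style_guide", "ui_kit", "design_tokens"]

-- s["slug"] : first-match association-list lookup (valid under Pre_, which demands the key)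
def pvSlug (s : List (String × String)) : String := (List.lookup "slug" s).getD ""

-- any(pat in slug for pat in DS_SLUG_PATTERNS)
def pvMatch (slug : String) : Bool := pvPatterns.any (fun pat => PySem.Str.isIn pat slug)

-- ===== PORT A =====
-- the for-loop, carrying ds_screen and remaining
def pvLoopA : List (List (String × String)) → Option (List (String × String)) → List (List (String × String)) → (Option (List (String × String))) × (List (List (String × String)))
  | [], ds, rem => (ds, rem)
  | s :: t, ds, rem =>
      let slug := pvSlug s
      if ds.isNone && pvMatch slug then pvLoopA t (some s) rem
      else pvLoopA t ds (rem ++ [s])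

def extract_design_system_screen_py (screens : List (List (String × String))) : (Option (List (String × String))) × (List (List (String × String))) :=
  pvLoopA screens none []

-- ===== PORT B =====
def extract_design_system_screen_py_alt (screens : List (List (String × String))) : (Option (List (String × String))) × (List (List (String × String))) :=
  let slugs := screens.map pvSlug
  match slugs.findIdx? pvMatch with
  | none => (none, screens)
  | some i =>
      ((PySem.List.pyGet? screens (i : Int)).getD [],
       PySem.List.slice screens none (some (i : Int)) ++ PySem.List.slice screens (some ((i : Int) + 1)) none)

-- ===== PRECONDITION & SPEC =====
-- Pre_ excludes exactly the inputs where some screen lacks a "slug" key: there Python A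
-- raises KeyError (and B raises it too).
def Pre_extract_design_system_screen_py (screens : List (List (String × String))) : Prop :=
  ∀ s ∈ screens, (List.lookup "slug" s).isSome = true
instance (screens : List (List (String × String))) : Decidable (Pre_extract_design_system_screen_py screens) := by unfold Pre_extract_design_system_screen_py; infer_instance

def pvWitness_extract_design_system_screen_py : (List (List (String × String))) :=
  [[("slug", "home")], [("slug", "ui_kit_v2"), ("name", "DS")]]

def Spec_extract_design_system_screen_py (screens : List (List (String × String))) (out : (Option (List (String × String))) × (List (List (String × String)))) : Prop := out = extract_design_system_screen_py_alt screens
instance (screens : List (List (String × String))) (out : (Option (List (String × String))) × (List (List (String × String)))) : Decidable (Spec_extract_design_system_screen_py screens out) := by unfold Spec_extract_design_system_screen_py; infer_instance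

-- ===== CLAIM (what is proved, stated in full; the proofs are below) =====
def Claim_equal_extract_design_system_screen_py : Prop := ∀ (screens : List (List (String × String))), Dom_extract_design_system_screen_py screens → Pre_extract_design_system_screen_py screens → Spec_extract_design_system_screen_py screens (extract_design_system_screen_py screens)

-- ===== LEMMAS AND PROOFS =====

-- once ds_screen is set, the loop only copies the rest into remaining
theorem pvLoopA_some (t : List (List (String × String))) :
    ∀ (d : List (String × String)) rem, pvLoopA t (some d) rem = (some d, rem ++ t) := by
  induction t with
  | nil => intro d rem; simp [pvLoopA]
  | cons s t ih => intro d rem; simp [pvLoopA, ih]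

-- while ds_screen is None, the loop computes the first matching index and splits there
theorem pvLoopA_none (t : List (List (String × String))) :
    ∀ rem, pvLoopA t none rem =
      match t.findIdx? (fun s => pvMatch (pvSlug s)) with
      | none => (none, rem ++ t)
      | some i => (some (t[i]?.getD []), rem ++ t.take i ++ t.drop (i + 1)) := by
  induction t with
  | nil => intro rem; simp [pvLoopA]
  | cons s t ih =>
      intro rem
      by_cases h : pvMatch (pvSlug s) = true
      · simp [pvLoopA, h, pvLoopA_some, List.findIdx?_cons]
      · simp only [pvLoopA, Option.isNone_none, Bool.true_and, h, if_false]
        rw [ih]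
        simp only [List.findIdx?_cons, h, Bool.false_eq_true, if_false]
        cases hf : t.findIdx? (fun s => pvMatch (pvSlug s)) with
        | none => simp
        | some i => simp [List.take_succ_cons, List.drop_succ_cons]

-- ===== VERDICT (by name: the statement is the Claim_ definition above) =====
theorem extract_design_system_screen_py_spec : Claim_equal_extract_design_system_screen_py := by
  intro screens _ _
  unfold Spec_extract_design_system_screen_py extract_design_system_screen_py extract_design_system_screen_py_alt
  rw [pvLoopA_none]
  simp only [List.findIdx?_map, Function.comp_def]
  cases hf : screens.findIdx? (fun s => pvMatch (pvSlug s)) with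
  | none => simp
  | some i =>
      simp only [PySem.List.pyGet?_natCast]
      have h1 : ((i : Int) + 1) = ((i + 1 : Nat) : Int) := by push_cast; ring
      rw [h1, PySem.List.slice_from_natCast]
      simp [PySem.List.slice_to_natCast]
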